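-- pv_equiv track=rewrite | github.com/impactless/Advent_of_Code_2024 | Day_20/day_20.py | find_cheat_paths
-- ===== SOURCE A (Python) =====
-- def find_cheat_paths(queue, cheat_moves=2, save=100):
--     nr_cheats = 0
--     for i in range(len(queue) - 1):
--         for j in range(i + 1, len(queue)):
--             manhattan = abs(queue[j][0][0] - queue[i][0][0]) + abs(queue[j][0][1] - queue[i][0][1])
--
--             if manhattan <= cheat_moves:
--                 temp_time = queue[j][1] - queue[i][1] - manhattan
--
--                 if temp_time >= save:
--                     nr_cheats += 1
--
--     return nr_cheats
-- ===== SOURCE B (Python) =====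
-- def find_cheat_paths(queue, cheat_moves=2, save=100):
--     # Spatial hash: bucket already-seen points by grid cell of side max(cheat_moves, 1);
--     # any pair within Manhattan distance cheat_moves lies within one cell step on each
--     # axis, so each point is compared only against the 3x3 neighbourhood of buckets.
--     cell = cheat_moves if cheat_moves > 1 else 1
--     grid = {}
--     nr_cheats = 0
--     for (x, y), t in queue:
--         cx, cy = x // cell, y // cell
--         for dx in (-1, 0, 1):
--             for dy in (-1, 0, 1):
--                 for (px, py), pt in grid.get((cx + dx, cy + dy), ()):
--                     m = abs(x - px) + abs(y - py)
--                     if m <= cheat_moves and t - pt - m >= save: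
--                         nr_cheats += 1
--         grid.setdefault((cx, cy), []).append(((x, y), t))
--     return nr_cheats
-- ===== Notes on version B (the rewrite author's own statement) =====
-- stated objective: alternative
-- what changed: Replaces A's all-pairs upper-triangle double loop with a spatial hash: seen points are bucketed by grid cell of side max(cheat_moves,1), and each point is compared only against the 3x3 neighbourhood of buckets, which contains every point within Manhattan distance cheat_moves.
import Mathlib
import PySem

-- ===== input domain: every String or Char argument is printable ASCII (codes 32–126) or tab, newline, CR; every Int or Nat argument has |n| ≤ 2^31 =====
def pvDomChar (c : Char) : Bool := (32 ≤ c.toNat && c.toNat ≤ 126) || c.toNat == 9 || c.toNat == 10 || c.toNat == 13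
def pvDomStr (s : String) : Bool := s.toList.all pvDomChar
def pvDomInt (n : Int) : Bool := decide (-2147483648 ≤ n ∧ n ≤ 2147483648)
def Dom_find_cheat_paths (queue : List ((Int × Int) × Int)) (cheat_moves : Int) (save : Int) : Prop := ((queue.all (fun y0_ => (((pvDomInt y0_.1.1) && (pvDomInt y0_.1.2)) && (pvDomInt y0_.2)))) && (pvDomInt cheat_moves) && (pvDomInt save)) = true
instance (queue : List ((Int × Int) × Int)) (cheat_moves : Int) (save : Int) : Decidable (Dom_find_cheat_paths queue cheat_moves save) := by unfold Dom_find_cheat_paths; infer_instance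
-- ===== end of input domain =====

-- B replaces A's all-pairs double loop by a spatial hash (buckets of side max(cheat_moves,1);
-- each point is compared only against the 3x3 neighbourhood of buckets).

-- ===== PORT A =====
def find_cheat_paths (queue : List ((Int × Int) × Int)) (cheat_moves : Int) (save : Int) : Int :=
  (PySem.List.pyRange 0 ((queue.length : Int) - 1) 1).foldl (fun nr_cheats i =>
    (PySem.List.pyRange (i + 1) (queue.length : Int) 1).foldl (fun nr_cheats j =>
      let qj := PySem.List.pyGetD queue j ((0, 0), 0)
      let qi := PySem.List.pyGetD queue i ((0, 0), 0)
      let manhattan := |qj.1.1 - qi.1.1| + |qj.1.2 - qi.1.2|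
      if manhattan ≤ cheat_moves then
        let temp_time := qj.2 - qi.2 - manhattan
        if temp_time ≥ save then nr_cheats + 1 else nr_cheats
      else nr_cheats) nr_cheats) 0

-- ===== PORT B =====
def find_cheat_paths_alt (queue : List ((Int × Int) × Int)) (cheat_moves : Int) (save : Int) : Int :=
  let cell := if cheat_moves > 1 then cheat_moves else 1
  (queue.foldl (fun (st : Int × PySem.Dict (Int × Int) (List ((Int × Int) × Int))) p =>
      let cx := PySem.Int.floordiv p.1.1 cell
      let cy := PySem.Int.floordiv p.1.2 cell
      let cnt := ([(-1 : Int), 0, 1]).foldl (fun acc dx =>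
        ([(-1 : Int), 0, 1]).foldl (fun acc dy =>
          (st.2.getD (cx + dx, cy + dy) []).foldl (fun a q =>
            let m := |p.1.1 - q.1.1| + |p.1.2 - q.1.2|
            if m ≤ cheat_moves ∧ p.2 - q.2 - m ≥ save then a + 1 else a) acc) acc) st.1
      (cnt, st.2.insert (cx, cy) (st.2.getD (cx, cy) [] ++ [p])))
    ((0 : Int), PySem.Dict.empty)).1

-- ===== PRECONDITION & SPEC =====
def Spec_find_cheat_paths (queue : List ((Int × Int) × Int)) (cheat_moves : Int) (save : Int) (out : Int) : Prop := out = find_cheat_paths_alt queue cheat_moves save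
instance (queue : List ((Int × Int) × Int)) (cheat_moves : Int) (save : Int) (out : Int) : Decidable (Spec_find_cheat_paths queue cheat_moves save out) := by unfold Spec_find_cheat_paths; infer_instance

-- ===== CLAIM (what is proved, stated in full; the proofs are below) =====
def Claim_equal_find_cheat_paths : Prop := ∀ (queue : List ((Int × Int) × Int)) (cheat_moves : Int) (save : Int), Dom_find_cheat_paths queue cheat_moves save → Spec_find_cheat_paths queue cheat_moves save (find_cheat_paths queue cheat_moves save)

-- ===== LEMMAS AND PROOFS =====

-- 'q is an earlier point, p a later one, and (q, p) is a qualifying cheat pair'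
def pvGood (cheat_moves save : Int) (q p : (Int × Int) × Int) : Bool :=
  decide (|p.1.1 - q.1.1| + |p.1.2 - q.1.2| ≤ cheat_moves ∧
          p.2 - q.2 - (|p.1.1 - q.1.1| + |p.1.2 - q.1.2|) ≥ save)

-- canonical count of qualifying (earlier, later) pairs
def pvPairs (cheat_moves save : Int) : List ((Int × Int) × Int) → Int
  | [] => 0
  | a :: l => (l.countP (pvGood cheat_moves save a) : Int) + pvPairs cheat_moves save l

-- the grid cell of a point, and the 3x3 neighbourhood of cell (cx, cy), in B's scan order
def pvCell (cell : Int) (q : (Int × Int) × Int) : Int × Int :=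
  (PySem.Int.floordiv q.1.1 cell, PySem.Int.floordiv q.1.2 cell)

def pvKeys (cx cy : Int) : List (Int × Int) :=
  [(cx + -1, cy + -1), (cx + -1, cy + 0), (cx + -1, cy + 1),
   (cx + 0, cy + -1), (cx + 0, cy + 0), (cx + 0, cy + 1),
   (cx + 1, cy + -1), (cx + 1, cy + 0), (cx + 1, cy + 1)]

-- A's result as a sum over its outer index range
theorem pvA_sum (C s : Int) (l : List ((Int × Int) × Int)) :
    ((List.range (l.length - 1)).map
       (fun k => ((l.drop (k + 1)).countP (pvGood C s (l.getD k ((0, 0), 0))) : Int))).sum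
      = pvPairs C s l := by
  induction l with
  | nil => simp [pvPairs]
  | cons a t ih =>
    rcases t with _ | ⟨b, t'⟩
    · simp [pvPairs]
    · simp only [List.length_cons, Nat.add_sub_cancel] at ih ⊢
      rw [List.range_succ_eq_map, List.map_cons, List.map_map, List.sum_cons]
      have hcongr : (List.range t'.length).map
          ((fun k => (((a :: b :: t').drop (k + 1)).countP
             (pvGood C s ((a :: b :: t').getD k ((0, 0), 0))) : Int)) ∘ Nat.succ)
          = (List.range t'.length).map
            (fun k => (((b :: t').drop (k + 1)).countP
               (pvGood C s ((b :: t').getD k ((0, 0), 0))) : Int)) := by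
        apply List.map_congr_left
        intro k _
        simp [Nat.succ_eq_add_one]
      rw [hcongr, ih]
      rw [show pvPairs C s (a :: b :: t')
            = ((b :: t').countP (pvGood C s a) : Int) + pvPairs C s (b :: t') from rfl]
      simp

-- A's nested loops compute the canonical pair count
theorem pvA_eq_pairs (queue : List ((Int × Int) × Int)) (C s : Int) :
    find_cheat_paths queue C s = pvPairs C s queue := by
  unfold find_cheat_paths
  rw [PySem.List.pyRange_one, List.foldl_map]
  have houter : ∀ (acc : Int) (k : Nat), k ∈ List.range (((queue.length : Int) - 1 - 0).toNat) →
      ((PySem.List.pyRange ((0 : Int) + (k : Int) + 1) (queue.length : Int) 1).foldl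
        (fun nr_cheats j =>
          let qj := PySem.List.pyGetD queue j ((0, 0), 0)
          let qi := PySem.List.pyGetD queue ((0 : Int) + (k : Int)) ((0, 0), 0)
          let manhattan := |qj.1.1 - qi.1.1| + |qj.1.2 - qi.1.2|
          if manhattan ≤ C then
            let temp_time := qj.2 - qi.2 - manhattan
            if temp_time ≥ s then nr_cheats + 1 else nr_cheats
          else nr_cheats) acc)
      = acc + ((queue.drop (k + 1)).countP (pvGood C s (queue.getD k ((0, 0), 0))) : Int) := by
    intro acc k _
    have hz : (0 : Int) + (k : Int) = (k : Int) := by ring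
    rw [hz]
    have := PySem.List.foldl_pyRange_pyGetD' queue ((0, 0), 0)
      (fun nr_cheats qj =>
        let qi := PySem.List.pyGetD queue (k : Int) ((0, 0), 0)
        let manhattan := |qj.1.1 - qi.1.1| + |qj.1.2 - qi.1.2|
        if manhattan ≤ C then
          let temp_time := qj.2 - qi.2 - manhattan
          if temp_time ≥ s then nr_cheats + 1 else nr_cheats
        else nr_cheats) acc (a := (k : Int) + 1) (by positivity)
    rw [this]
    have htn : ((k : Int) + 1).toNat = k + 1 := by omega
    rw [htn]
    have hq : PySem.List.pyGetD queue (k : Int) ((0, 0), 0) = queue.getD k ((0, 0), 0) :=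
      PySem.List.pyGetD_natCast queue k ((0, 0), 0)
    have hfun : (fun (nr_cheats : Int) qj =>
        let qi := PySem.List.pyGetD queue (k : Int) ((0, 0), 0)
        let manhattan := |qj.1.1 - qi.1.1| + |qj.1.2 - qi.1.2|
        if manhattan ≤ C then
          let temp_time := qj.2 - qi.2 - manhattan
          if temp_time ≥ s then nr_cheats + 1 else nr_cheats
        else nr_cheats)
        = (fun (nr_cheats : Int) qj =>
          if pvGood C s (queue.getD k ((0, 0), 0)) qj = true then nr_cheats + 1 else nr_cheats) := by
      funext nr qj
      simp only [hq, pvGood, decide_eq_true_eq]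
      split_ifs with h1 h2 h3 <;> first | rfl | (exfalso; tauto)
    rw [hfun, PySem.List.foldl_count_if]
  rw [PySem.List.foldl_congr_mem _ _ _ _ (fun acc k hk => houter acc k hk)]
  rw [PySem.List.foldl_add]
  have hrange : ((queue.length : Int) - 1 - 0).toNat = queue.length - 1 := by omega
  rw [hrange, zero_add]
  exact pvA_sum C s queue

-- floor division moves by at most one cell when the argument moves by at most the cell size
theorem pvFdivAdj (c a b : Int) (hc : 0 < c) (h : |a - b| ≤ c) :
    PySem.Int.floordiv b c - 1 ≤ PySem.Int.floordiv a c ∧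
    PySem.Int.floordiv a c ≤ PySem.Int.floordiv b c + 1 := by
  rw [PySem.Int.floordiv_eq_ediv_of_pos hc, PySem.Int.floordiv_eq_ediv_of_pos hc]
  have hab := abs_le.mp h
  have e1 : (b - c) / c = b / c + -1 := by
    rw [show b - c = b + (-1) * c by ring]
    exact Int.add_mul_ediv_right b (-1) (ne_of_gt hc)
  have e2 : (b + c) / c = b / c + 1 := by
    rw [show b + c = b + 1 * c by ring]
    exact Int.add_mul_ediv_right b 1 (ne_of_gt hc)
  have l1 : (b - c) / c ≤ a / c := Int.ediv_le_ediv hc (by omega)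
  have l2 : a / c ≤ (b + c) / c := Int.ediv_le_ediv hc (by omega)
  omega

-- a qualifying earlier point lies in one of the nine buckets around the new point's cell
theorem pvAdj (C s cell : Int) (hc : cell = if C > 1 then C else 1)
    (q p : (Int × Int) × Int) (h : pvGood C s q p = true) :
    pvCell cell q ∈ pvKeys (PySem.Int.floordiv p.1.1 cell) (PySem.Int.floordiv p.1.2 cell) := by
  have hg := of_decide_eq_true h
  have hcpos : 0 < cell := by rw [hc]; split_ifs <;> omega
  have hC : C ≤ cell := by rw [hc]; split_ifs <;> omega
  have hx : |q.1.1 - p.1.1| ≤ cell := by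
    have := abs_nonneg (p.1.2 - q.1.2)
    have h1 := abs_sub_comm p.1.1 q.1.1
    omega
  have hy : |q.1.2 - p.1.2| ≤ cell := by
    have := abs_nonneg (p.1.1 - q.1.1)
    have h1 := abs_sub_comm p.1.2 q.1.2
    omega
  have bx := pvFdivAdj cell q.1.1 p.1.1 hcpos hx
  have by_ := pvFdivAdj cell q.1.2 p.1.2 hcpos hy
  simp only [pvCell, pvKeys, List.mem_cons, List.not_mem_nil, or_false, Prod.mk.injEq]
  omega

-- indicator sums over a key list
theorem pvIndZero (keys : List (Int × Int)) (k0 : Int × Int) (c : Int) (h : k0 ∉ keys) :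
    (keys.map (fun k => if k0 = k then c else 0)).sum = 0 := by
  induction keys with
  | nil => simp
  | cons k ks ih =>
    simp only [List.mem_cons, not_or] at h
    simp [h.1, ih h.2]

theorem pvIndOne (keys : List (Int × Int)) (k0 : Int × Int) (hnd : keys.Nodup) (hm : k0 ∈ keys) :
    (keys.map (fun k => if k0 = k then (1 : Int) else 0)).sum = 1 := by
  induction keys with
  | nil => simp at hm
  | cons k ks ih =>
    rcases List.nodup_cons.mp hnd with ⟨hk, hks⟩
    rcases List.mem_cons.mp hm with h | h
    · subst h
      simp [pvIndZero ks k0 1 hk]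
    · have hne : k0 ≠ k := fun he => hk (he ▸ h)
      simp [hne, ih hks h]

-- a count over all seen points splits into per-bucket counts, when every hit is in some bucket
theorem pvCountSplit (P : (Int × Int) × Int → Bool) (key : (Int × Int) × Int → Int × Int)
    (keys : List (Int × Int)) (hnd : keys.Nodup)
    (hin : ∀ q, P q = true → key q ∈ keys) (seen : List ((Int × Int) × Int)) :
    (keys.map (fun k => ((seen.countP (fun q => P q && decide (key q = k))) : Int))).sum
      = (seen.countP P : Int) := by
  induction seen with
  | nil => simp
  | cons q rest ih =>
    have hterm : ∀ k : Int × Int,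
        (((q :: rest).countP (fun q' => P q' && decide (key q' = k))) : Int)
          = ((rest.countP (fun q' => P q' && decide (key q' = k))) : Int)
            + (if P q = true then (if key q = k then (1 : Int) else 0) else 0) := by
      intro k
      rw [List.countP_cons]
      by_cases hp : P q = true
      · by_cases hk : key q = k
        · simp [hp, hk]
        · simp [hp, hk]
      · simp [hp]
    calc (keys.map (fun k => (((q :: rest).countP (fun q' => P q' && decide (key q' = k))) : Int))).sum
        = (keys.map (fun k => ((rest.countP (fun q' => P q' && decide (key q' = k))) : Int)
            + (if P q = true then (if key q = k then (1 : Int) else 0) else 0))).sum := by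
          exact congrArg _ (List.map_congr_left (fun k _ => hterm k))
      _ = (keys.map (fun k => ((rest.countP (fun q' => P q' && decide (key q' = k))) : Int))).sum
            + (keys.map (fun k => if P q = true then (if key q = k then (1 : Int) else 0) else 0)).sum := by
          rw [← List.sum_map_add]
      _ = (rest.countP P : Int) + (if P q = true then (1 : Int) else 0) := by
          rw [ih]
          by_cases hp : P q = true
          · simp only [hp, if_true]
            rw [pvIndOne keys (key q) hnd (hin q hp)]
          · simp [hp]
      _ = ((q :: rest).countP P : Int) := by
          rw [List.countP_cons]
          by_cases hp : P q = true <;> simp [hp]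
    
-- B's 3x3 bucket scan counts exactly the qualifying seen points
theorem pvInner (C s cell : Int) (hc : cell = if C > 1 then C else 1)
    (p : (Int × Int) × Int) (d : PySem.Dict (Int × Int) (List ((Int × Int) × Int)))
    (seen : List ((Int × Int) × Int))
    (hinv : ∀ k, d.getD k [] = seen.filter (fun q => decide (pvCell cell q = k))) (acc : Int) :
    ((pvKeys (PySem.Int.floordiv p.1.1 cell) (PySem.Int.floordiv p.1.2 cell)).foldl
        (fun acc k => (d.getD k []).foldl
          (fun a q => if pvGood C s q p = true then a + 1 else a) acc) acc)
      = acc + (seen.countP (fun q => pvGood C s q p) : Int) := by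
  have hstep : ∀ (acc : Int) (k : Int × Int),
      k ∈ pvKeys (PySem.Int.floordiv p.1.1 cell) (PySem.Int.floordiv p.1.2 cell) →
      ((d.getD k []).foldl (fun a q => if pvGood C s q p = true then a + 1 else a) acc)
        = acc + (((seen.countP (fun q => (pvGood C s q p) && decide (pvCell cell q = k)))) : Int) := by
    intro acc k _
    rw [PySem.List.foldl_count_if, hinv k, List.countP_filter]
  rw [PySem.List.foldl_congr_mem _ _ _ _ hstep, PySem.List.foldl_add]
  have hnd : (pvKeys (PySem.Int.floordiv p.1.1 cell) (PySem.Int.floordiv p.1.2 cell)).Nodup := by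
    simp [pvKeys, Prod.ext_iff]
  rw [pvCountSplit (fun q => pvGood C s q p) (pvCell cell) _ hnd
    (fun q hq => pvAdj C s cell hc q p hq) seen]

-- B's loop invariant: running count = initial + (new points vs seen prefix) + pairs within the rest
theorem pvB_inv (C s cell : Int) (hc : cell = if C > 1 then C else 1)
    (l : List ((Int × Int) × Int)) :
    ∀ (seen : List ((Int × Int) × Int)) (acc : Int)
      (d : PySem.Dict (Int × Int) (List ((Int × Int) × Int))),
    (∀ k, d.getD k [] = seen.filter (fun q => decide (pvCell cell q = k))) →
    (l.foldl (fun (st : Int × PySem.Dict (Int × Int) (List ((Int × Int) × Int))) p =>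
        let cx := PySem.Int.floordiv p.1.1 cell
        let cy := PySem.Int.floordiv p.1.2 cell
        let cnt := ([(-1 : Int), 0, 1]).foldl (fun acc dx =>
          ([(-1 : Int), 0, 1]).foldl (fun acc dy =>
            (st.2.getD (cx + dx, cy + dy) []).foldl (fun a q =>
              let m := |p.1.1 - q.1.1| + |p.1.2 - q.1.2|
              if m ≤ C ∧ p.2 - q.2 - m ≥ s then a + 1 else a) acc) acc) st.1
        (cnt, st.2.insert (cx, cy) (st.2.getD (cx, cy) [] ++ [p]))) (acc, d)).1
      = acc + (l.map (fun p => (seen.countP (fun q => pvGood C s q p) : Int))).sum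
            + pvPairs C s l := by
  induction l with
  | nil => intro seen acc d _; simp [pvPairs]
  | cons p l' ih =>
    intro seen acc d hinv
    rw [List.foldl_cons]
    have hfun : (fun (a : Int) (q : (Int × Int) × Int) =>
        let m := |p.1.1 - q.1.1| + |p.1.2 - q.1.2|
        if m ≤ C ∧ p.2 - q.2 - m ≥ s then a + 1 else a)
        = (fun (a : Int) q => if pvGood C s q p = true then a + 1 else a) := by
      funext a q
      simp only [pvGood, decide_eq_true_eq]
    have hnine : ([(-1 : Int), 0, 1]).foldl (fun acc dx =>
          ([(-1 : Int), 0, 1]).foldl (fun acc dy =>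
            (d.getD (PySem.Int.floordiv p.1.1 cell + dx, PySem.Int.floordiv p.1.2 cell + dy) []).foldl
              (fun a q =>
                let m := |p.1.1 - q.1.1| + |p.1.2 - q.1.2|
                if m ≤ C ∧ p.2 - q.2 - m ≥ s then a + 1 else a) acc) acc) acc
        = acc + (seen.countP (fun q => pvGood C s q p) : Int) := by
      simp only [List.foldl_cons, List.foldl_nil, hfun]
      have := pvInner C s cell hc p d seen hinv acc
      simpa only [pvKeys, List.foldl_cons, List.foldl_nil] using this
    simp only
    rw [hnine]
    have hinv' : ∀ k, (d.insert (PySem.Int.floordiv p.1.1 cell, PySem.Int.floordiv p.1.2 cell)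
          (d.getD (PySem.Int.floordiv p.1.1 cell, PySem.Int.floordiv p.1.2 cell) [] ++ [p])).getD k []
        = (seen ++ [p]).filter (fun q => decide (pvCell cell q = k)) := by
      intro k
      rw [PySem.Dict.getD_insert, List.filter_append]
      by_cases hk : k = (PySem.Int.floordiv p.1.1 cell, PySem.Int.floordiv p.1.2 cell)
      · subst hk
        rw [if_pos rfl, hinv]
        have hone : (List.filter (fun q => decide (pvCell cell q
              = (PySem.Int.floordiv p.1.1 cell, PySem.Int.floordiv p.1.2 cell))) [p]) = [p] := by
          simp [pvCell]
        rw [hone]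
      · have hp : pvCell cell p ≠ k := fun he => hk (by rw [← he]; rfl)
        rw [if_neg hk, hinv k]
        have hnil : (List.filter (fun q => decide (pvCell cell q = k)) [p]) = [] := by
          simp [hp]
        rw [hnil, List.append_nil]
    rw [ih (seen ++ [p]) (acc + (seen.countP (fun q => pvGood C s q p) : Int)) _ hinv']
    have hcross : (l'.map (fun r => (((seen ++ [p]).countP (fun q => pvGood C s q r)) : Int))).sum
        = (l'.map (fun r => ((seen.countP (fun q => pvGood C s q r)) : Int))).sum
          + (l'.countP (pvGood C s p) : Int) := by
      have hpt : ∀ r, (((seen ++ [p]).countP (fun q => pvGood C s q r)) : Int)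
          = ((seen.countP (fun q => pvGood C s q r)) : Int)
            + (if pvGood C s p r = true then (1 : Int) else 0) := by
        intro r
        have hcn : ([p].countP (fun q => pvGood C s q r))
            = if pvGood C s p r = true then 1 else 0 := by
          simp [List.countP_cons]
        rw [List.countP_append, hcn]
        split_ifs <;> push_cast <;> ring
      calc (l'.map (fun r => (((seen ++ [p]).countP (fun q => pvGood C s q r)) : Int))).sum
          = (l'.map (fun r => ((seen.countP (fun q => pvGood C s q r)) : Int)
              + (if pvGood C s p r = true then (1 : Int) else 0))).sum := by
            exact congrArg _ (List.map_congr_left (fun r _ => hpt r))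
        _ = (l'.map (fun r => ((seen.countP (fun q => pvGood C s q r)) : Int))).sum
              + (l'.map (fun r => if pvGood C s p r = true then (1 : Int) else 0)).sum := by
            rw [← List.sum_map_add]
        _ = _ := by rw [PySem.List.sum_map_ite_one_zero]
    simp only [List.map_cons, List.sum_cons, hcross, pvPairs]
    ring

-- B computes the canonical pair count as well
theorem pvB_eq_pairs (queue : List ((Int × Int) × Int)) (C s : Int) :
    find_cheat_paths_alt queue C s = pvPairs C s queue := by
  unfold find_cheat_paths_alt
  rw [pvB_inv C s (if C > 1 then C else 1) rfl queue [] 0 PySem.Dict.empty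
    (by intro k; simp [PySem.Dict.getD_empty])]
  simp

-- ===== VERDICT (by name: the statement is the Claim_ definition above) =====
theorem find_cheat_paths_spec : Claim_equal_find_cheat_paths := by
  intro queue C s _
  unfold Spec_find_cheat_paths
  rw [pvA_eq_pairs, pvB_eq_pairs]
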